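-- pv_equiv track=rewrite | github.com/soryuasukalangley/csc108 | a1_part1.py | count_common_occurrences
-- ===== SOURCE A (Python) =====
-- def count_common_occurrences(word1, word2):
--     '''
--     (str, str) -> int
--
--     Given two strings, word1 and word2, return how many characters in word1 are
--     letters that also occur in word2. You can assume all characters in the
--     given string are lowercase. Also, spaces do not count as a common character.
--
--     Algorithm:
--     - Go through each character in word1, one by one. If this character
--       occurs in word2, then add 1 to the count. Return total count after
--       you're done going through the characters.
--
--     >>> count_common_occurrences('bob y', 'bobbette z')
--     3
--
--     >>> count_common_occurrences('bobbette z', 'bob y')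
--     4
--     '''
--     co=0
--     word1 = word1.replace(" ", "")
--     word2 = word2.replace(" ", "")
--     for ch in word1:
--         if ch in word2:
--             co+=1
--     return co
-- ===== SOURCE B (Python) =====
-- def count_common_occurrences(word1, word2):
--     counts = {}
--     for ch in word1.replace(" ", ""):
--         counts[ch] = counts.get(ch, 0) + 1
--     return sum(counts.get(c, 0) for c in set(word2.replace(" ", "")))
-- ===== Notes on version B (the rewrite author's own statement) =====
-- stated objective: alternative
-- what changed: Instead of scanning word2 once per character of word1, B builds a frequency table of word1's non-space characters in one pass and sums the table entries over the distinct non-space characters of word2.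
import Mathlib
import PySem

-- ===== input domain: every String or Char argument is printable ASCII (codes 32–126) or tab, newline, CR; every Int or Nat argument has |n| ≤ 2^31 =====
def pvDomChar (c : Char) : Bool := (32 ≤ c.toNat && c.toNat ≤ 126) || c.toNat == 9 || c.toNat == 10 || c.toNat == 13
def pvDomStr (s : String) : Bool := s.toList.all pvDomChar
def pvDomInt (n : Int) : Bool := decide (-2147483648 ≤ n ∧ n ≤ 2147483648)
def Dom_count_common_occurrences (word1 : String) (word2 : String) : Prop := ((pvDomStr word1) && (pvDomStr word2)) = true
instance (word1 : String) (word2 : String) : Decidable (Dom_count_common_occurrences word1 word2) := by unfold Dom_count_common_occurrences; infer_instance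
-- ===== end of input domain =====

-- B replaces A's per-character rescan of word2 by a one-pass frequency table of word1
-- probed with the distinct non-space characters of word2 (alternative algorithm).


-- ===== PORT A =====
def count_common_occurrences (word1 : String) (word2 : String) : Int :=
  let co : Int := 0
  let w1 := PySem.Str.replace word1 " " ""
  let w2 := PySem.Str.replace word2 " " ""
  w1.toList.foldl (fun co ch => if PySem.Chars.isIn [ch] w2.toList then co + 1 else co) co

-- ===== PORT B =====
def count_common_occurrences_alt (word1 : String) (word2 : String) : Int :=
  let counts : PySem.Dict Char Int :=
    (PySem.Str.replace word1 " " "").toList.foldl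
      (fun d ch => d.insert ch (d.getD ch 0 + 1)) PySem.Dict.empty
  (PySem.Set.ofList (PySem.Str.replace word2 " " "").toList).foldl
    (fun acc c => acc + counts.getD c 0) 0

-- ===== PRECONDITION & SPEC =====
def Spec_count_common_occurrences (word1 : String) (word2 : String) (out : Int) : Prop := out = count_common_occurrences_alt word1 word2
instance (word1 : String) (word2 : String) (out : Int) : Decidable (Spec_count_common_occurrences word1 word2 out) := by unfold Spec_count_common_occurrences; infer_instance

-- ===== CLAIM (what is proved, stated in full; the proofs are below) =====
def Claim_equal_count_common_occurrences : Prop := ∀ (word1 : String) (word2 : String), Dom_count_common_occurrences word1 word2 → Spec_count_common_occurrences word1 word2 (count_common_occurrences word1 word2)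

-- ===== LEMMAS AND PROOFS =====

-- a one-character substring test is membership
theorem isIn_singleton_iff (c : Char) (l : List Char) :
    PySem.Chars.isIn [c] l = true ↔ c ∈ l := by
  rw [PySem.Chars.isIn_iff_infix]
  constructor
  · intro h; exact h.mem (List.mem_singleton_self c)
  · intro h
    obtain ⟨p, q, rfl⟩ := List.mem_iff_append.mp h
    exact ⟨p, q, by simp⟩

-- on a duplicate-free list, the 0/1 indicator sum is a membership test
theorem sum_indicator_nodup (x : Char) (s : List Char) (hs : s.Nodup) :
    (s.map (fun c => if x = c then (1 : Int) else 0)).sum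
      = if x ∈ s then 1 else 0 := by
  induction s with
  | nil => simp
  | cons a t ih =>
    simp only [List.nodup_cons] at hs
    by_cases hxa : x = a
    · subst hxa
      simp [hs.1, ih hs.2]
    · simp [hxa, ih hs.2]

-- tallying word1 once and probing with the distinct letters of word2 counts
-- exactly the characters of word1 that occur in word2
theorem sum_count_eq_countP (w1 s : List Char) (hs : s.Nodup) :
    (s.map (fun c => (w1.count c : Int))).sum
      = (w1.countP (fun ch => decide (ch ∈ s)) : Int) := by
  induction w1 with
  | nil => simp
  | cons x t ih =>
    have hcount : ∀ c : Char, ((x :: t).count c : Int)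
        = (t.count c : Int) + (if x = c then 1 else 0) := by
      intro c
      by_cases h : x = c <;> simp [h]
    calc (s.map (fun c => ((x :: t).count c : Int))).sum
        = (s.map (fun c => (t.count c : Int) + (if x = c then 1 else 0))).sum := by
          simp only [hcount]
      _ = (s.map (fun c => (t.count c : Int))).sum
            + (s.map (fun c => if x = c then (1 : Int) else 0)).sum := by
          rw [PySem.List.sum_map_add_int]
      _ = (t.countP (fun ch => decide (ch ∈ s)) : Int) + (if x ∈ s then 1 else 0) := by
          rw [ih, sum_indicator_nodup x s hs]
      _ = ((x :: t).countP (fun ch => decide (ch ∈ s)) : Int) := by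
          by_cases hx : x ∈ s <;> simp [hx]

-- ===== VERDICT (by name: the statement is the Claim_ definition above) =====
set_option maxHeartbeats 1000000 in
theorem count_common_occurrences_spec : Claim_equal_count_common_occurrences := by
  intro word1 word2 _
  unfold Spec_count_common_occurrences count_common_occurrences count_common_occurrences_alt
  simp only
  set w1 := (PySem.Str.replace word1 " " "").toList with hw1
  set w2 := (PySem.Str.replace word2 " " "").toList with hw2
  rw [PySem.List.foldl_if_add_one, PySem.List.foldl_add]
  simp only [zero_add]
  have hgetD : ∀ c : Char,
      (w1.foldl (fun d ch => d.insert ch (d.getD ch 0 + 1)) PySem.Dict.empty).getD c 0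
        = (w1.count c : Int) := by
    intro c
    rw [PySem.Dict.getD_foldl_insert_add_one]
    simp [PySem.Dict.getD_empty]
  have hmap : (PySem.Set.ofList w2).map
      (fun c => (w1.foldl (fun d ch => d.insert ch (d.getD ch 0 + 1)) PySem.Dict.empty).getD c 0)
      = (PySem.Set.ofList w2).map (fun c => (w1.count c : Int)) := by
    exact List.map_congr_left (fun c _ => hgetD c)
  rw [hmap, sum_count_eq_countP w1 (PySem.Set.ofList w2) (PySem.Set.nodup_ofList w2)]
  congr 1
  apply List.countP_congr
  intro ch _
  simp [isIn_singleton_iff, PySem.Set.mem_ofList]
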